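-- pv_equiv track=rewrite | github.com/ivanbratovic/aoc2020 | day14/day14.py | apply_mask_value
-- ===== SOURCE A (Python) =====
-- def apply_mask_value(value: int, mask: str):
--     mask_0 = [35-i for i in range(len(mask)) if mask[i] == "0"]
--     mask_1 = [35-i for i in range(len(mask)) if mask[i] == "1"]
--     for i in range(36):
--         mask = 1 << i
--         if i in mask_0:
--             value &= ~mask
--         if i in mask_1:
--             value |= mask
--     return value
-- ===== SOURCE B (Python) =====
-- def apply_mask_value(value: int, mask: str):
--     set_mask = 0
--     clear_mask = 0
--     for i, c in enumerate(mask):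
--         b = 35 - i
--         if b >= 0:
--             if c == "1":
--                 set_mask |= 1 << b
--             elif c == "0":
--                 clear_mask |= 1 << b
--     return (value | set_mask) & ~clear_mask
-- ===== Notes on version B (the rewrite author's own statement) =====
-- stated objective: simpler
-- what changed: Instead of building two lists of bit positions and then looping over all 36 bits with list-membership tests, B makes one pass over the mask string accumulating a set-bits integer and a clear-bits integer and applies them once with (value | set_mask) & ~clear_mask.
import Mathlib
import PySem

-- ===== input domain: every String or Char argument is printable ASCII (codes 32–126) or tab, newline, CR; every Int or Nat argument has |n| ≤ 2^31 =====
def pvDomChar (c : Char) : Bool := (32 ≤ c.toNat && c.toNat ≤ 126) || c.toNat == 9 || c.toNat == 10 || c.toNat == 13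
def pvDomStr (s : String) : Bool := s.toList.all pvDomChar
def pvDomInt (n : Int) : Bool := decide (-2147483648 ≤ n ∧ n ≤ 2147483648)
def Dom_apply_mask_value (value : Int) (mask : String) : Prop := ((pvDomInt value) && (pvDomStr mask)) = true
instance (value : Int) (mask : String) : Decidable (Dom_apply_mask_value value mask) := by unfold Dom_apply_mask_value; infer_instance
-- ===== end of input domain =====

-- B replaces A's two position lists and 36-iteration loop with membership tests by a single
-- pass over the mask building two bitmask accumulators, applied once at the end (objective: simpler).

-- ===== PORT A =====
-- the comprehension [35 - i for i in range(len(mask)) if mask[i] == c]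
def pvMaskList (cs : List Char) (c : Char) : List Int :=
  ((PySem.List.pyRange 0 (cs.length : Int) 1).filter
      (fun i => (PySem.Chars.pyGet? cs i).getD ' ' == c)).map (fun i => 35 - i)

-- the body of A's for-loop over range(36): value &= ~mask / value |= mask
def pvAStep (mask_0 mask_1 : List Int) (value : Int) (i : Int) : Int :=
  let m : Int := (1 : Int) <<< i
  let value := if mask_0.contains i then PySem.Int.band value (~~~ m) else value
  if mask_1.contains i then PySem.Int.bor value m else value

def apply_mask_value (value : Int) (mask : String) : Int :=
  let cs := mask.toList
  let mask_0 : List Int := pvMaskList cs '0'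
  let mask_1 : List Int := pvMaskList cs '1'
  (PySem.List.pyRange 0 36 1).foldl (pvAStep mask_0 mask_1) value

-- ===== PORT B =====
-- the body of B's for-loop over enumerate(mask)
def pvBStep (acc : Int × Int) (ic : Int × Char) : Int × Int :=
  let b : Int := 35 - ic.1
  if 0 ≤ b then
    if ic.2 == '1' then (PySem.Int.bor acc.1 ((1 : Int) <<< b), acc.2)
    else if ic.2 == '0' then (acc.1, PySem.Int.bor acc.2 ((1 : Int) <<< b))
    else acc
  else acc

def apply_mask_value_alt (value : Int) (mask : String) : Int :=
  let p := (PySem.List.enumerate mask.toList).foldl pvBStep (0, 0)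
  PySem.Int.band (PySem.Int.bor value p.1) (~~~ p.2)

-- ===== PRECONDITION & SPEC =====
def Spec_apply_mask_value (value : Int) (mask : String) (out : Int) : Prop := out = apply_mask_value_alt value mask
instance (value : Int) (mask : String) (out : Int) : Decidable (Spec_apply_mask_value value mask out) := by unfold Spec_apply_mask_value; infer_instance

-- ===== CLAIM (what is proved, stated in full; the proofs are below) =====
def Claim_equal_apply_mask_value : Prop := ∀ (value : Int) (mask : String), Dom_apply_mask_value value mask → Spec_apply_mask_value value mask (apply_mask_value value mask)

-- ===== LEMMAS AND PROOFS =====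

-- Nat bridge: subtracting the common bits is Nat.ldiff
theorem pv_sub_and (m : Nat) : ∀ n, m - (m &&& n) = Nat.ldiff m n := by
  induction m using Nat.binaryRec with
  | zero =>
    intro n
    refine Eq.symm (Nat.eq_of_testBit_eq fun k => ?_)
    simp [Nat.testBit_ldiff]
  | bit b m ih =>
    intro n
    induction n using Nat.bitCasesOn with
    | _ c n =>
      rw [Nat.land_bit, Nat.ldiff_bit, ← ih n]
      have h : m &&& n ≤ m := Nat.and_le_left
      cases b <;> cases c <;> simp [Nat.bit] <;> omega

theorem pv_band_eq (a b : Int) : PySem.Int.band a b = Int.land a b := by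
  cases a with
  | ofNat m => cases b with
    | ofNat n => simp [PySem.Int.band, Int.land]
    | negSucc n => simp [PySem.Int.band, Int.land, pv_sub_and]
  | negSucc m => cases b with
    | ofNat n => simp [PySem.Int.band, Int.land, pv_sub_and]
    | negSucc n => simp [PySem.Int.band, Int.land]; omega

theorem pv_bor_eq (a b : Int) : PySem.Int.bor a b = Int.lor a b := by
  cases a with
  | ofNat m => cases b with
    | ofNat n => simp [PySem.Int.bor, Int.lor]
    | negSucc n => simp [PySem.Int.bor, Int.lor, pv_sub_and]; omega
  | negSucc m => cases b with
    | ofNat n => simp [PySem.Int.bor, Int.lor, pv_sub_and]; omega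
    | negSucc n => simp [PySem.Int.bor, Int.lor]; omega

theorem pv_tb_band (a b : Int) (k : Nat) :
    (PySem.Int.band a b).testBit k = (a.testBit k && b.testBit k) := by
  rw [pv_band_eq]; exact Int.testBit_land a b k

theorem pv_tb_bor (a b : Int) (k : Nat) :
    (PySem.Int.bor a b).testBit k = (a.testBit k || b.testBit k) := by
  rw [pv_bor_eq]; exact Int.testBit_lor a b k

theorem pv_tb_not (a : Int) (k : Nat) : (~~~a).testBit k = !a.testBit k := by
  have h : (~~~a) = Int.lnot a := Int.neg_inj.mp rfl
  rw [h]; exact Int.testBit_lnot a k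

theorem pv_tb_shift (i : Int) (h : 0 ≤ i) (k : Nat) :
    ((1 : Int) <<< i).testBit k = decide (i = (k : Int)) := by
  obtain ⟨n, rfl⟩ := Int.eq_ofNat_of_zero_le h
  have h2 : (1 : Int) <<< ((n : Nat) : Int) = ((2 ^ n : Nat) : Int) := by
    have := Int.shiftLeft_natCast 1 n
    simpa [Nat.shiftLeft_eq] using this
  rw [h2]
  show Nat.testBit (2 ^ n) k = _
  simp [Nat.testBit_two_pow]

-- Int extensionality through testBit
theorem pv_int_ext (a b : Int) (h : ∀ k, a.testBit k = b.testBit k) : a = b := by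
  cases a with
  | ofNat m => cases b with
    | ofNat n =>
      exact congrArg Int.ofNat (Nat.eq_of_testBit_eq fun k => h k)
    | negSucc n =>
      exfalso
      have hk := h (m + n)
      have h1 : Nat.testBit m (m + n) = false :=
        Nat.testBit_lt_two_pow (lt_of_lt_of_le Nat.lt_two_pow_self
          (Nat.pow_le_pow_right (by norm_num) (Nat.le_add_right m n)))
      have h2 : Nat.testBit n (m + n) = false :=
        Nat.testBit_lt_two_pow (lt_of_lt_of_le Nat.lt_two_pow_self
          (Nat.pow_le_pow_right (by norm_num) (Nat.le_add_left n m)))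
      simp [Int.testBit, h1, h2] at hk
  | negSucc m => cases b with
    | ofNat n =>
      exfalso
      have hk := h (m + n)
      have h1 : Nat.testBit m (m + n) = false :=
        Nat.testBit_lt_two_pow (lt_of_lt_of_le Nat.lt_two_pow_self
          (Nat.pow_le_pow_right (by norm_num) (Nat.le_add_right m n)))
      have h2 : Nat.testBit n (m + n) = false :=
        Nat.testBit_lt_two_pow (lt_of_lt_of_le Nat.lt_two_pow_self
          (Nat.pow_le_pow_right (by norm_num) (Nat.le_add_left n m)))
      simp [Int.testBit, h1, h2] at hk
    | negSucc n =>
      have : m = n := Nat.eq_of_testBit_eq fun k => by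
        have hk := h k
        simp [Int.testBit] at hk
        exact hk
      rw [this]

-- does bit k of the 36-bit mask come from a mask character c?
def pvHit (cs : List Char) (c : Char) (k : Nat) : Bool :=
  decide (k ≤ 35) && decide (35 - k < cs.length) && (cs.getD (35 - k) ' ' == c)

theorem pv_contains_mask (cs : List Char) (c : Char) (t : Nat) (ht : t ≤ 35) :
    (pvMaskList cs c).contains ((t : Nat) : Int) = pvHit cs c t := by
  unfold pvMaskList pvHit
  rw [Bool.eq_iff_iff]
  simp only [List.contains_iff_mem, List.mem_map, List.mem_filter,
    PySem.List.mem_pyRange_one, Bool.and_eq_true, decide_eq_true_eq, beq_iff_eq]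
  constructor
  · rintro ⟨i, ⟨⟨hi0, hil⟩, hch⟩, hit⟩
    have hnat : 35 - t < cs.length := by omega
    have hidx : i = ((35 - t : Nat) : Int) := by omega
    subst hidx
    have h1 : PySem.Chars.pyGet? cs ((35 - t : Nat) : Int) = some cs[35 - t] := by
      simp [pysem, hnat]
    rw [h1] at hch
    refine ⟨⟨ht, hnat⟩, ?_⟩
    rw [List.getD_eq_getElem cs ' ' hnat]
    simpa using hch
  · rintro ⟨⟨_, hnat⟩, hch⟩
    refine ⟨((35 - t : Nat) : Int), ⟨⟨by omega, by omega⟩, ?_⟩, by omega⟩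
    have h1 : PySem.Chars.pyGet? cs ((35 - t : Nat) : Int) = some cs[35 - t] := by
      simp [pysem, hnat]
    rw [h1]
    rw [List.getD_eq_getElem cs ' ' hnat] at hch
    simpa using hch

theorem pv_hit_disjoint (cs : List Char) (k : Nat) :
    ¬ (pvHit cs '0' k = true ∧ pvHit cs '1' k = true) := by
  simp [pvHit]
  intro _ _ h _ _
  simp [h]

-- A's 36-iteration loop, characterised bit by bit
theorem pv_A_loop (cs : List Char) (value : Int) (k : Nat) :
    ∀ t : Nat, t ≤ 36 →
    (((PySem.List.pyRange 0 (t : Int) 1).foldl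
        (pvAStep (pvMaskList cs '0') (pvMaskList cs '1')) value).testBit k)
    = if k < t then
        (if pvHit cs '1' k then true else if pvHit cs '0' k then false else value.testBit k)
      else value.testBit k := by
  intro t
  induction t with
  | zero =>
    intro _
    rw [PySem.List.pyRange_one_eq_nil (by omega)]
    simp
  | succ t ih =>
    intro ht
    have h1 : ((t + 1 : Nat) : Int) = (t : Int) + 1 := by push_cast; ring
    rw [h1, PySem.List.pyRange_one_succ_right (by omega), List.foldl_append, List.foldl_cons,
      List.foldl_nil]
    have hik := ih (by omega)
    generalize (PySem.List.pyRange 0 (t : Int) 1).foldl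
        (pvAStep (pvMaskList cs '0') (pvMaskList cs '1')) value = v at hik ⊢
    unfold pvAStep
    rw [pv_contains_mask cs '0' t (by omega), pv_contains_mask cs '1' t (by omega)]
    have hsh := pv_tb_shift (t : Int) (by omega) k
    by_cases hkt : k = t
    · subst hkt
      cases h0 : pvHit cs '0' k <;> cases hh1 : pvHit cs '1' k <;>
        simp [hik, pv_tb_band, pv_tb_bor, pv_tb_not, hsh, h0, hh1]
    · have hd : (decide ((t : Int) = (k : Int))) = false := by simp; omega
      have hd2 : (decide (t = k)) = false := by simp; omega
      have hlt1 : (k < t + 1) = (k < t) := by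
        by_cases h : k < t <;> simp [h] <;> omega
      cases h0 : pvHit cs '0' t <;> cases hh1 : pvHit cs '1' t <;>
        simp [hik, pv_tb_band, pv_tb_bor, pv_tb_not, hsh, hd, hd2, h0, hh1, hlt1]

-- contribution of a mask suffix starting at character position s (B's accumulators)
def pvHitFrom (cs : List Char) (s : Int) (c : Char) (k : Nat) : Bool :=
  decide (0 ≤ 35 - s - (k : Int)) && decide (35 - s - (k : Int) < (cs.length : Int)) &&
    (cs.getD (35 - s - (k : Int)).toNat ' ' == c)

theorem pv_hitFrom_zero (cs : List Char) (c : Char) (k : Nat) :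
    pvHitFrom cs 0 c k = pvHit cs c k := by
  unfold pvHitFrom pvHit
  by_cases h1 : k ≤ 35
  · have h3 : ((35 - 0 - (k:Int))).toNat = 35 - k := by omega
    by_cases h4 : 35 - k < cs.length
    · have h5 : 35 - (k:Int) < (cs.length:Int) := by omega
      simp [h3, h4, h5]
    · have h5 : ¬ (35 - (k:Int) < (cs.length:Int)) := by omega
      simp [h4, h5]
  · have h2 : ¬ ((0:Int) ≤ 35 - 0 - (k:Int)) := by omega
    simp [h1, h2]

theorem pv_hitFrom_cons (ch : Char) (cs : List Char) (s : Int) (c : Char) (k : Nat) :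
    pvHitFrom (ch :: cs) s c k
      = ((decide (35 - s = (k : Int)) && (ch == c)) || pvHitFrom cs (s + 1) c k) := by
  unfold pvHitFrom
  rw [Bool.eq_iff_iff]
  simp only [Bool.and_eq_true, Bool.or_eq_true, decide_eq_true_eq, beq_iff_eq,
    List.length_cons]
  constructor
  · rintro ⟨⟨h0, hl⟩, hch⟩
    by_cases he : 35 - s - (k : Int) = 0
    · left
      have ht : (35 - s - (k:Int)).toNat = 0 := by omega
      rw [ht, List.getD_cons_zero] at hch
      exact ⟨by omega, hch⟩
    · right
      have ht : (35 - s - (k:Int)).toNat = (35 - (s+1) - (k:Int)).toNat + 1 := by omega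
      rw [ht, List.getD_cons_succ] at hch
      exact ⟨⟨by omega, by omega⟩, hch⟩
  · rintro (⟨he, hch⟩ | ⟨⟨h0, hl⟩, hch⟩)
    · have ht : (35 - s - (k:Int)).toNat = 0 := by omega
      rw [ht, List.getD_cons_zero]
      exact ⟨⟨by omega, by omega⟩, hch⟩
    · have ht : (35 - s - (k:Int)).toNat = (35 - (s+1) - (k:Int)).toNat + 1 := by omega
      rw [ht, List.getD_cons_succ]
      exact ⟨⟨by omega, by omega⟩, hch⟩

-- B's single pass, characterised bit by bit
theorem pv_B_fold (k : Nat) (cs : List Char) :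
    ∀ (s : Int), 0 ≤ s → ∀ (acc : Int × Int),
    (((PySem.List.enumerate cs s).foldl pvBStep acc).1.testBit k
      = (acc.1.testBit k || pvHitFrom cs s '1' k))
    ∧ (((PySem.List.enumerate cs s).foldl pvBStep acc).2.testBit k
      = (acc.2.testBit k || pvHitFrom cs s '0' k)) := by
  induction cs with
  | nil =>
    intro s hs acc
    constructor <;> simp [PySem.List.enumerate_nil, pvHitFrom]
  | cons ch cs ih =>
    intro s hs acc
    rw [PySem.List.enumerate_cons, List.foldl_cons]
    obtain ⟨hA, hB⟩ := ih (s + 1) (by omega) (pvBStep acc (s, ch))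
    rw [hA, hB, pv_hitFrom_cons ch cs s '1' k, pv_hitFrom_cons ch cs s '0' k]
    by_cases hb : (0:Int) ≤ 35 - s
    · by_cases hc1 : ch = '1'
      · subst hc1
        have hstep : pvBStep acc (s, '1') = (PySem.Int.bor acc.1 ((1:Int) <<< (35 - s)), acc.2) := by
          simp [pvBStep]
          intro h
          exact absurd h (by omega)
        rw [hstep]
        constructor
        · dsimp only
          rw [pv_tb_bor, pv_tb_shift (35 - s) hb k]
          cases h : decide (35 - s = (k:Int)) <;> simp [h, Bool.or_assoc]
        · simp
      · by_cases hc0 : ch = '0'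
        · subst hc0
          have hstep : pvBStep acc (s, '0') = (acc.1, PySem.Int.bor acc.2 ((1:Int) <<< (35 - s))) := by
            simp [pvBStep]
            intro h
            exact absurd h (by omega)
          rw [hstep]
          constructor
          · have e1 : (('0' : Char) == '1') = false := by decide
            simp [e1]
          · dsimp only
            rw [pv_tb_bor, pv_tb_shift (35 - s) hb k]
            cases h : decide (35 - s = (k:Int)) <;> simp [h, Bool.or_assoc]
        · have hstep : pvBStep acc (s, ch) = acc := by
            have e1 : ((ch : Char) == '1') = false := by simp [hc1]
            have e0 : ((ch : Char) == '0') = false := by simp [hc0]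
            simp [pvBStep, hb, e1, e0]
          have e1 : ((ch : Char) == '1') = false := by simp [hc1]
          have e0 : ((ch : Char) == '0') = false := by simp [hc0]
          rw [hstep]
          simp [e1, e0]
    · have hstep : pvBStep acc (s, ch) = acc := by
        simp [pvBStep]
        intro h
        exact absurd h (by omega)
      have hd : (decide (35 - s = (k:Int))) = false := by simp; omega
      rw [hstep]
      simp [hd]

-- ===== VERDICT (by name: the statement is the Claim_ definition above) =====
theorem apply_mask_value_spec : Claim_equal_apply_mask_value := by
  intro value mask _
  unfold Spec_apply_mask_value apply_mask_value apply_mask_value_alt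
  apply pv_int_ext
  intro k
  have hA := pv_A_loop mask.toList value k 36 (by omega)
  have hB := pv_B_fold k mask.toList 0 (by omega) (0, 0)
  simp only [Nat.cast_ofNat] at hA
  rw [hA]
  rw [pv_tb_band, pv_tb_bor, pv_tb_not, hB.1, hB.2, pv_hitFrom_zero, pv_hitFrom_zero]
  have hd := pv_hit_disjoint mask.toList k
  by_cases hk : k < 36
  · simp only [if_pos hk]
    cases h1 : pvHit mask.toList '1' k <;> cases h0 : pvHit mask.toList '0' k <;>
      simp_all [Int.testBit]
  · simp only [if_neg hk]
    have h1 : pvHit mask.toList '1' k = false := by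
      simp [pvHit]; omega
    have h0 : pvHit mask.toList '0' k = false := by
      simp [pvHit]; omega
    simp [h1, h0, Int.testBit]
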